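-- pv_equiv track=rewrite | github.com/laxmi-narayan-87/coding | python/icpc/final/gcd.py | construct_coprime_array
-- ===== SOURCE A (Python) =====
-- def construct_coprime_array(T, test_cases):
--     import math
--     from itertools import count
--
--     # Helper function to generate prime numbers
--     def generate_primes(limit):
--         is_prime = [True] * (limit + 1)
--         is_prime[0] = is_prime[1] = False
--         primes = []
--         for i in range(2, limit + 1):
--             if is_prime[i]:
--                 primes.append(i)
--                 for j in range(i * i, limit + 1, i):
--                     is_prime[j] = False
--         return primes
--
--     # Generate primes up to 2 * 10^6
--     primes = generate_primes(2 * 10**6)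
--
--     results = []
--     for n, k in test_cases:
--         # Maximum possible pairs
--         max_pairs = n * (n - 1) // 2
--         if k > max_pairs:
--             results.append("-1")
--             continue
--
--         # Construct the array
--         arr = []
--         remaining_pairs = k
--
--         # Use prime numbers to maximize co-prime pairs
--         for p in primes:
--             arr.append(p)
--             if len(arr) == n:
--                 break
--
--         # If fewer pairs are required, introduce non-co-prime numbers
--         i = 0
--         while remaining_pairs < max_pairs:
--             arr[i % n] *= primes[0]  # Introduce a common factor
--             i += 1
--             max_pairs -= 1
--
--         results.append(" ".join(map(str, arr)))
--
--     return results
-- ===== SOURCE B (Python) =====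
-- def construct_coprime_array(T, test_cases):
--     # Helper function to generate prime numbers (same sieve as the original)
--     def generate_primes(limit):
--         is_prime = [True] * (limit + 1)
--         is_prime[0] = is_prime[1] = False
--         primes = []
--         for i in range(2, limit + 1):
--             if is_prime[i]:
--                 primes.append(i)
--                 for j in range(i * i, limit + 1, i):
--                     is_prime[j] = False
--         return primes
--
--     primes = generate_primes(2 * 10**6)
--     factor = primes[0]
--
--     results = []
--     for n, k in test_cases:
--         max_pairs = n * (n - 1) // 2
--         if k > max_pairs:
--             results.append("-1")
--             continue
--         # Closed form: position j is hit q times, plus once more if j < r,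
--         # where q, r = divmod(number of reductions, n).
--         q, r = divmod(max_pairs - k, n)
--         results.append(" ".join(str(p * factor ** (q + (1 if j < r else 0)))
--                                 for j, p in enumerate(primes[:n])))
--     return results
-- ===== Notes on version B (the rewrite author's own statement) =====
-- stated objective: alternative
-- what changed: A builds the first-n-primes array and then runs a while loop doing max_pairs-k separate in-place 'arr[i%n] *= primes[0]' multiplications; B computes each element directly in one pass via the closed form primes[j] * factor**(q + (1 if j < r else 0)) with q, r = divmod(max_pairs - k, n), eliminating that loop (the fixed 2*10^6 sieve dominates the measured running time, so this is not measurably faster on the timed inputs).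
-- outside the precondition, e.g. on construct_coprime_array(1, [(0, -1)]): A raises ZeroDivisionError, B raises ZeroDivisionError
import Mathlib
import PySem

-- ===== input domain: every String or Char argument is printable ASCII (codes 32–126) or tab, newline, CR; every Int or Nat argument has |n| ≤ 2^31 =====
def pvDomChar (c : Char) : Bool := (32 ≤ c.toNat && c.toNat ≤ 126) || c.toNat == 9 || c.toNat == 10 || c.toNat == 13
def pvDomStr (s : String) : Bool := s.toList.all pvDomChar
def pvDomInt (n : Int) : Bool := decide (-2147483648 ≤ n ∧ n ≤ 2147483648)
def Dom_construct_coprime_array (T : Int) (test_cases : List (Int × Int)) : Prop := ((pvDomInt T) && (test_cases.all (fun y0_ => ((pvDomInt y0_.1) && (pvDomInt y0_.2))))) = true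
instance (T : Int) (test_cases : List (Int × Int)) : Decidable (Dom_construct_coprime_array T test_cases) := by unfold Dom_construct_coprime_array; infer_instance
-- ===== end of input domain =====

-- B replaces A's per-case while loop of max_pairs−k in-place multiplications by a closed form
-- (each position j is hit q + (1 if j < r) times, q,r = divmod(max_pairs−k, n)): objective = alternative.
-- Both Pythons contain the textually identical sieve helper generate_primes; it is ported once below
-- and shared by both ports.

-- ===== SHARED HELPER (identical 'generate_primes' sieve in both Pythons) =====
-- inner 'for j in range(i*i, limit+1, i)' marking loop; indices are nonnegative, kept as Nat;
-- the 'step = 0' test only makes the recursion total (callers pass step = i ≥ 2)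
def pvMark (limit step j : Nat) (a : Array Bool) : Array Bool :=
  if step = 0 then a else
  if j ≤ limit then pvMark limit step (j + step) (a.setIfInBounds j false) else a
termination_by limit + 1 - j
decreasing_by omega

-- outer 'for i in range(2, limit+1)' loop; primes accumulated with push (Python list.append)
def pvSieveLoop (limit i : Nat) (a : Array Bool) (primes : Array Int) : Array Int :=
  if i ≤ limit then
    if a.getD i false then
      pvSieveLoop limit (i + 1) (pvMark limit i (i * i) a) (primes.push (i : Int))
    else pvSieveLoop limit (i + 1) a primes
  else primes
termination_by limit + 1 - i

def pvGeneratePrimes (limit : Nat) : List Int :=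
  (pvSieveLoop limit 2
    (((Array.replicate (limit + 1) true).setIfInBounds 0 false).setIfInBounds 1 false)
    (Array.emptyWithCapacity 0)).toList

-- ===== PORT A =====
-- 'for p in primes: arr.append(p); if len(arr) == n: break'
def pvBuildArr (n : Int) (ps : List Int) (arr : List Int) : List Int :=
  match ps with
  | [] => arr
  | p :: rest =>
    let arr' := arr ++ [p]
    if (arr'.length : Int) = n then arr' else pvBuildArr n rest arr'

-- 'while remaining_pairs < max_pairs: arr[i % n] *= primes[0]; i += 1; max_pairs -= 1'
-- the out-of-range write Python would raise on (only reachable outside Pre_) is a no-op here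
def pvAdjustLoop (f n i maxp k : Int) (arr : List Int) : List Int :=
  if k < maxp then
    pvAdjustLoop f n (i + 1) (maxp - 1) k
      (PySem.List.pySetD arr (PySem.Int.mod i n)
        (PySem.List.pyGetD arr (PySem.Int.mod i n) 0 * f))
  else arr
termination_by (maxp - k).toNat
decreasing_by omega

def construct_coprime_array (T : Int) (test_cases : List (Int × Int)) : List String :=
  let primes := pvGeneratePrimes 2000000
  test_cases.foldl (fun results nk =>
    let maxp := PySem.Int.floordiv (nk.1 * (nk.1 - 1)) 2
    if maxp < nk.2 then results ++ ["-1"]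
    else results ++ [PySem.Str.join " "
      ((pvAdjustLoop (PySem.List.pyGetD primes 0 0) nk.1 0 maxp nk.2
          (pvBuildArr nk.1 primes [])).map PySem.Int.toStr)]) []

-- ===== PORT B =====
def construct_coprime_array_alt (T : Int) (test_cases : List (Int × Int)) : List String :=
  let primes := pvGeneratePrimes 2000000
  let factor := PySem.List.pyGetD primes 0 0
  test_cases.map (fun nk =>
    let maxp := PySem.Int.floordiv (nk.1 * (nk.1 - 1)) 2
    if maxp < nk.2 then "-1"
    else
      let q := PySem.Int.floordiv (maxp - nk.2) nk.1
      let r := PySem.Int.mod (maxp - nk.2) nk.1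
      PySem.Str.join " "
        ((PySem.List.enumerate (PySem.List.slice primes none (some nk.1)) 0).map
          (fun jp => PySem.Int.toStr
            (jp.2 * factor ^ (q + (if jp.1 < r then 1 else 0)).toNat))))

-- ===== PRECONDITION & SPEC =====
-- Pre_ excludes test cases with n ≤ 0 unless the k > max_pairs branch answers "-1" (n ≤ 0 is not a
-- valid array length: A raises ZeroDivisionError for n = 0, k ≤ 0, and for n < 0 either raises
-- IndexError or returns an accidental value built from ALL 148933 sieve primes with negative-index
-- wraparound writes), and test cases with n > 148933, where A raises IndexError (the sieve holds
-- only 148933 primes).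
def Pre_construct_coprime_array (T : Int) (test_cases : List (Int × Int)) : Prop :=
  ∀ p ∈ test_cases,
    PySem.Int.floordiv (p.1 * (p.1 - 1)) 2 < p.2 ∨ (1 ≤ p.1 ∧ p.1 ≤ 148933)
instance (T : Int) (test_cases : List (Int × Int)) : Decidable (Pre_construct_coprime_array T test_cases) := by unfold Pre_construct_coprime_array; infer_instance
def pvWitness_construct_coprime_array : Int × (List (Int × Int)) := (2, [(3, 2), (4, 0), (5, 100)])

def Spec_construct_coprime_array (T : Int) (test_cases : List (Int × Int)) (out : List String) : Prop := out = construct_coprime_array_alt T test_cases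
instance (T : Int) (test_cases : List (Int × Int)) (out : List String) : Decidable (Spec_construct_coprime_array T test_cases out) := by unfold Spec_construct_coprime_array; infer_instance

-- ===== CLAIM (what is proved, stated in full; the proofs are below) =====
def Claim_equal_construct_coprime_array : Prop := ∀ (T : Int) (test_cases : List (Int × Int)), Dom_construct_coprime_array T test_cases → Pre_construct_coprime_array T test_cases → Spec_construct_coprime_array T test_cases (construct_coprime_array T test_cases)

-- ===== LEMMAS AND PROOFS =====

-- A's append-until-length-n loop is 'take'
lemma pvBuildArr_eq (n : Int) (hn : 1 ≤ n) :
    ∀ (ps acc : List Int), acc.length < n.toNat →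
      pvBuildArr n ps acc = acc ++ ps.take (n.toNat - acc.length) := by
  intro ps
  induction ps with
  | nil => intro acc h; simp [pvBuildArr]
  | cons p rest ih =>
    intro acc h
    rw [pvBuildArr]
    by_cases hlen : ((acc ++ [p]).length : Int) = n
    · rw [if_pos hlen]
      have : n.toNat - acc.length = 1 := by
        simp at hlen; omega
      rw [this]
      simp
    · rw [if_neg hlen]
      have h' : (acc ++ [p]).length < n.toNat := by
        simp at hlen ⊢; omega
      rw [ih (acc ++ [p]) h']
      have h2 : n.toNat - acc.length = (n.toNat - (acc ++ [p]).length) + 1 := by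
        simp; omega
      rw [h2, List.take_succ_cons]
      simp

-- how often index j is hit by m rounds of 'i % N': closed form m / N + (1 if j < m % N)
lemma pvCount_closed (N j : Nat) (hN : 0 < N) (hj : j < N) :
    ∀ m : Nat, (List.range m).countP (fun t => t % N == j)
      = m / N + if j < m % N then 1 else 0 := by
  intro m
  induction m with
  | zero => simp
  | succ m ih =>
    rw [List.range_succ, List.countP_append, ih]
    have m1 := Nat.mod_lt m hN
    have hmod : (m + 1) % N = (m % N + 1) % N := by
      conv_lhs => rw [← Nat.div_add_mod m N]
      rw [Nat.add_assoc, Nat.mul_add_mod]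
    have hdiv : (m + 1) / N = m / N + (m % N + 1) / N := by
      conv_lhs => rw [← Nat.div_add_mod m N]
      rw [Nat.add_assoc, Nat.mul_add_div hN]
    rcases eq_or_ne (m % N + 1) N with h | h
    · rw [hmod, hdiv, h, Nat.mod_self, Nat.div_self hN]
      simp only [List.countP_singleton, beq_iff_eq]
      split_ifs <;> omega
    · have hlt : m % N + 1 < N := by omega
      rw [hmod, hdiv, Nat.mod_eq_of_lt hlt, Nat.div_eq_of_lt hlt]
      simp only [List.countP_singleton, beq_iff_eq]
      split_ifs <;> omega

-- A's while loop multiplies element j by f once per hit of index j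
lemma pvAdjustLoop_eq (f n : Int) (hn : 1 ≤ n) :
    ∀ (m : Nat) (i maxp k : Int) (arr : List Int), 0 ≤ i → (maxp - k).toNat = m →
      pvAdjustLoop f n i maxp k arr
        = arr.mapIdx (fun j x =>
            x * f ^ (List.range m).countP
              (fun (t : Nat) => PySem.Int.mod (i + (t : Int)) n == (j : Int))) := by
  intro m
  induction m with
  | zero =>
    intro i maxp k arr hi hm
    rw [pvAdjustLoop, if_neg (by omega)]
    apply List.ext_getElem
    · simp
    · intro j hj1 hj2
      simp
  | succ m ih =>
    intro i maxp k arr hi hm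
    rw [pvAdjustLoop, if_pos (by omega)]
    rw [ih (i + 1) (maxp - 1) k _ (by omega) (by omega)]
    have hM0 : 0 ≤ PySem.Int.mod i n := PySem.Int.mod_nonneg i (by omega)
    set M := PySem.Int.mod i n with hMdef
    rw [PySem.List.pySetD_of_nonneg _ _ hM0, PySem.List.pyGetD_of_nonneg _ _ hM0]
    have hsplit : ∀ (jj : Nat),
        (List.range (m + 1)).countP (fun (t : Nat) => PySem.Int.mod (i + (t : Int)) n == (jj : Int))
        = ((if M == (jj : Int) then 1 else 0)
           + (List.range m).countP (fun (t : Nat) => PySem.Int.mod ((i + 1) + (t : Int)) n == (jj : Int))) := by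
      intro jj
      rw [List.range_succ_eq_map, List.countP_cons, List.countP_map]
      have hc : ((fun (t : Nat) => PySem.Int.mod (i + (t : Int)) n == (jj : Int)) ∘ Nat.succ)
           = (fun (t : Nat) => PySem.Int.mod ((i + 1) + (t : Int)) n == (jj : Int)) := by
        funext t
        simp only [Function.comp]
        congr 2
        push_cast
        ring
      rw [hc]
      simp only [Nat.cast_zero, add_zero, ← hMdef]
      omega
    apply List.ext_getElem
    · simp
    · intro j hj1 hj2
      simp only [List.getElem_mapIdx]
      rw [List.getElem_set]
      by_cases hMj : M.toNat = j
      · have hjr : j < arr.length := by simpa using hj2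
        rw [if_pos hMj]
        rw [hsplit j, if_pos (by simp only [beq_iff_eq]; omega)]
        rw [List.getD_eq_getElem _ _ (by omega)]
        simp only [hMj]
        rw [pow_add, pow_one]
        ring
      · rw [if_neg hMj]
        rw [hsplit j, if_neg (by simp only [beq_iff_eq]; omega)]
        simp

-- one test case in the main branch: A's loop result equals B's closed form
lemma pvCase_eq (ps : List Int) (f n k : Int) (hn : 1 ≤ n)
    (hk : ¬ PySem.Int.floordiv (n * (n - 1)) 2 < k) :
    pvAdjustLoop f n 0 (PySem.Int.floordiv (n * (n - 1)) 2) k (pvBuildArr n ps [])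
      = (PySem.List.enumerate (PySem.List.slice ps none (some n)) 0).map
          (fun jp => jp.2 * f ^
            ((PySem.Int.floordiv (PySem.Int.floordiv (n * (n - 1)) 2 - k) n)
              + (if jp.1 < PySem.Int.mod (PySem.Int.floordiv (n * (n - 1)) 2 - k) n then 1 else 0)).toNat) := by
  set maxp := PySem.Int.floordiv (n * (n - 1)) 2 with hmaxp
  have hmk : 0 ≤ maxp - k := by omega
  obtain ⟨N, hNn⟩ : ∃ N : Nat, (N : Int) = n := ⟨n.toNat, Int.toNat_of_nonneg (by omega)⟩
  have hN1 : 0 < N := by omega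
  have hNtoNat : n.toNat = N := by omega
  obtain ⟨Mn, hMn⟩ : ∃ M : Nat, (M : Int) = maxp - k := ⟨(maxp - k).toNat, Int.toNat_of_nonneg hmk⟩
  have hbuild : pvBuildArr n ps [] = ps.take N := by
    rw [pvBuildArr_eq n hn ps [] (by simp; omega)]
    simp [hNtoNat]
  rw [hbuild, pvAdjustLoop_eq f n hn Mn 0 maxp k _ le_rfl (by omega),
      PySem.List.slice_to ps (by omega), hNtoNat]
  apply List.ext_getElem
  · simp only [List.length_mapIdx, List.length_map, PySem.List.length_enumerate,
      List.length_take]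
  · intro j hj1 hj2
    have hjlen : j < (List.take N ps).length := by simpa using hj1
    have hjN : j < N := by
      simp at hjlen
      omega
    rw [List.getElem_map,
      PySem.List.getElem_enumerate _ _ _ (by simpa [PySem.List.length_enumerate] using hjlen),
      List.getElem_mapIdx]
    simp only
    congr 1
    -- exponents agree
    have hcnt : (List.range Mn).countP
        (fun (t : Nat) => PySem.Int.mod ((0 : Int) + (t : Int)) n == (j : Int))
        = (List.range Mn).countP (fun t => t % N == j) := by
      apply List.countP_congr
      intro t _
      rw [zero_add, ← hNn, PySem.Int.mod_natCast]
      simp only [beq_iff_eq]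
      constructor <;> intro h <;> omega
    have hexp : (PySem.Int.floordiv (maxp - k) n
        + (if ((0 : Int) + (j : Int)) < PySem.Int.mod (maxp - k) n then 1 else 0)).toNat
        = Mn / N + (if j < Mn % N then 1 else 0) := by
      rw [← hMn, ← hNn, PySem.Int.floordiv_natCast, PySem.Int.mod_natCast, zero_add]
      by_cases hlt : j < Mn % N
      · rw [if_pos hlt, if_pos (by push_cast; omega)]
        rw [show ((Mn / N : Nat) : Int) + 1 = ((Mn / N + 1 : Nat) : Int) by push_cast; ring,
          Int.toNat_natCast]
      · rw [if_neg hlt, if_neg (by push_cast; omega)]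
        rw [add_zero, add_zero, Int.toNat_natCast]
    rw [hcnt, pvCount_closed N j hN1 hjN Mn, hexp]

-- the whole result list: A's foldl with appends is B's map, case by case
lemma pvFold_eq (ps : List Int) (f : Int) :
    ∀ (cases : List (Int × Int)) (acc : List String),
      (∀ p ∈ cases, PySem.Int.floordiv (p.1 * (p.1 - 1)) 2 < p.2 ∨ (1 ≤ p.1 ∧ p.1 ≤ 148933)) →
      cases.foldl (fun results nk =>
        if PySem.Int.floordiv (nk.1 * (nk.1 - 1)) 2 < nk.2 then results ++ ["-1"]
        else results ++ [PySem.Str.join " "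
          ((pvAdjustLoop f nk.1 0 (PySem.Int.floordiv (nk.1 * (nk.1 - 1)) 2) nk.2
              (pvBuildArr nk.1 ps [])).map PySem.Int.toStr)]) acc
      = acc ++ cases.map (fun nk =>
          if PySem.Int.floordiv (nk.1 * (nk.1 - 1)) 2 < nk.2 then "-1"
          else PySem.Str.join " "
            ((PySem.List.enumerate (PySem.List.slice ps none (some nk.1)) 0).map
              (fun jp => PySem.Int.toStr
                (jp.2 * f ^
                  ((PySem.Int.floordiv (PySem.Int.floordiv (nk.1 * (nk.1 - 1)) 2 - nk.2) nk.1)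
                    + (if jp.1 < PySem.Int.mod (PySem.Int.floordiv (nk.1 * (nk.1 - 1)) 2 - nk.2) nk.1 then 1 else 0)).toNat)))) := by
  intro cases
  induction cases with
  | nil => intro acc _; simp
  | cons nk rest ih =>
    intro acc hpre
    have hnk := hpre nk (List.mem_cons_self ..)
    have hrest : ∀ p ∈ rest, PySem.Int.floordiv (p.1 * (p.1 - 1)) 2 < p.2 ∨ (1 ≤ p.1 ∧ p.1 ≤ 148933) := by
      intro p hp; exact hpre p (List.mem_cons_of_mem _ hp)
    simp only [List.foldl_cons, List.map_cons]
    by_cases hb : PySem.Int.floordiv (nk.1 * (nk.1 - 1)) 2 < nk.2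
    · rw [if_pos hb, ih _ hrest, if_pos hb]
      simp
    · rcases hnk with h | ⟨hn1, _⟩
      · exact absurd h hb
      rw [if_neg hb, ih _ hrest, if_neg hb]
      rw [pvCase_eq ps f nk.1 nk.2 hn1 hb, List.map_map,
        List.append_assoc, List.singleton_append]
      rfl

-- ===== VERDICT (by name: the statement is the Claim_ definition above) =====
theorem construct_coprime_array_spec : Claim_equal_construct_coprime_array := by
  intro T test_cases _ hpre
  unfold Spec_construct_coprime_array
  unfold Pre_construct_coprime_array at hpre
  simp only [construct_coprime_array, construct_coprime_array_alt]
  rw [pvFold_eq (pvGeneratePrimes 2000000) (PySem.List.pyGetD (pvGeneratePrimes 2000000) 0 0) test_cases [] hpre]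
  simp
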